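-- pv_equiv track=rewrite | github.com/m000/cliutils | bin/kvalign.py | get_spacing
-- ===== SOURCE A (Python) =====
-- def get_spacing(lines, sep, maxsplit=-1):
--     # calculate the number of columns
--     if maxsplit == -1:
--         ncols = max([l.count(sep) for l in lines]) + 1
--     else:
--         ncols = maxsplit + 1
--
--     # leading indentation and column widths
--     indent = 0
--     colw = ncols * [0]
--
--     # run through the lines to calculate indent and colw
--     for l in lines:
--         # current line column widths - single column lines are skipped
--         lw = list(map(lambda s: len(s.strip()), l.split(sep, ncols - 1)))
--         if len(lw) == 1:
--             continue
--         lw.extend((ncols - len(lw)) * [0])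
--
--         # update indent and colw
--         indent = max(indent, len(l) - len(l.lstrip(" ")))
--         colw = map(max, zip(colw, lw))
--
--     return (indent, list(colw))
-- ===== SOURCE B (Python) =====
-- def get_spacing(lines, sep, maxsplit=-1):
--     # number of columns
--     if maxsplit == -1:
--         ncols = max(l.count(sep) for l in lines) + 1
--     else:
--         ncols = maxsplit + 1
--
--     # stage 1: per-line token-width rows; single-field lines carry no alignment info
--     rows = []
--     for l in lines:
--         fields = l.split(sep, ncols - 1)
--         if len(fields) != 1:
--             rows.append((l, [len(f.strip()) for f in fields]))
--
--     # stage 2: aggregate over the kept lines, column by column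
--     indent = max((len(l) - len(l.lstrip(" ")) for l, _ in rows), default=0)
--     colw = [max((w[j] for _, w in rows if j < len(w)), default=0)
--             for j in range(ncols)]
--     return (indent, colw)
-- ===== Notes on version B (the rewrite author's own statement) =====
-- stated objective: alternative
-- what changed: A folds a running (indent, column-widths) pair through the lines, updating colw by an elementwise zip/max at every line; B first collects the per-line token-width rows of the multi-field lines in one pass and then aggregates indent and each column's width separately, computing colw[j] as a per-column max over the collected rows. Pre_ excludes only inputs where A raises ValueError (empty separator with a nonempty line list; maxsplit=-1 with an empty line list), where B raises too.
import Mathlib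
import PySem

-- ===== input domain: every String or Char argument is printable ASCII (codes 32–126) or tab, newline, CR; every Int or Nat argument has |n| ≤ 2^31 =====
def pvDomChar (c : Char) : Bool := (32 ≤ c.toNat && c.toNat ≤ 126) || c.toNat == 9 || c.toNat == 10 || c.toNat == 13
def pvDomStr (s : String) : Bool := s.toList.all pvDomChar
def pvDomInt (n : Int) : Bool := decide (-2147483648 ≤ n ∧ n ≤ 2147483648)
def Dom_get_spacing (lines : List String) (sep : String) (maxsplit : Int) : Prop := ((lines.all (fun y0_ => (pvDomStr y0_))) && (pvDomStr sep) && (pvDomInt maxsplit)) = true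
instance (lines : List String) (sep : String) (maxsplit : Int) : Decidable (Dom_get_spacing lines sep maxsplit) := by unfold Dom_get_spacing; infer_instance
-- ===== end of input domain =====

-- B restates A's single fold over lines as two staged passes: collect per-line token-width
-- rows once, then aggregate indent and each column's width independently (same cost, different decomposition).


-- ===== PORT A =====
-- exact port of l.lstrip(" "): drop the leading characters that are spaces
def pvLstripSpaces (l : String) : List Char := l.toList.dropWhile (fun c => c == ' ')

def get_spacing (lines : List String) (sep : String) (maxsplit : Int) : Int × List Int :=
  let ncols : Int :=
    if maxsplit = -1 then
      ((PySem.List.max? (lines.map (fun l => (PySem.Str.count l sep : Int))) (fun x => x)).getD 0) + 1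
    else maxsplit + 1
  let indent : Int := 0
  let colw : List Int := PySem.List.pyRepeat [(0 : Int)] ncols
  let r := lines.foldl (fun st l =>
    let lw : List Int := ((PySem.Str.splitMax? l sep (ncols - 1)).getD []).map
        (fun s => (PySem.Str.len (PySem.Str.strip s) : Int))
    if lw.length = 1 then st
    else
      let lw' := lw ++ PySem.List.pyRepeat [(0 : Int)] (ncols - (lw.length : Int))
      (max st.1 ((PySem.Str.len l : Int) - ((pvLstripSpaces l).length : Int)),
       (st.2.zip lw').map (fun p => max p.1 p.2))) (indent, colw)
  (r.1, r.2)

-- ===== PORT B =====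
def get_spacing_alt (lines : List String) (sep : String) (maxsplit : Int) : Int × List Int :=
  let ncols : Int :=
    if maxsplit = -1 then
      ((PySem.List.max? (lines.map (fun l => (PySem.Str.count l sep : Int))) (fun x => x)).getD 0) + 1
    else maxsplit + 1
  let rows : List (String × List Int) := lines.foldl (fun acc l =>
      let fields := (PySem.Str.splitMax? l sep (ncols - 1)).getD []
      if fields.length ≠ 1 then
        acc ++ [(l, fields.map (fun f => (PySem.Str.len (PySem.Str.strip f) : Int)))]
      else acc) []
  let indent : Int :=
    PySem.List.maxD (rows.map (fun r => (PySem.Str.len r.1 : Int) - ((pvLstripSpaces r.1).length : Int)))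
      (fun x => x) 0
  let colw : List Int := (PySem.List.pyRange 0 ncols 1).map (fun j =>
      PySem.List.maxD
        ((rows.filter (fun r => decide (j < (r.2.length : Int)))).map (fun r => PySem.List.pyGetD r.2 j 0))
        (fun x => x) 0)
  (indent, colw)

-- ===== PRECONDITION & SPEC =====
-- Pre_ excludes exactly the inputs on which A raises: an empty separator with a nonempty line
-- list (str.split raises ValueError) and maxsplit = -1 with an empty line list (max() of an
-- empty sequence raises ValueError).
def Pre_get_spacing (lines : List String) (sep : String) (maxsplit : Int) : Prop :=
  (sep ≠ "" ∨ lines = []) ∧ (maxsplit = -1 → lines ≠ [])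
instance (lines : List String) (sep : String) (maxsplit : Int) : Decidable (Pre_get_spacing lines sep maxsplit) := by unfold Pre_get_spacing; infer_instance

def pvWitness_get_spacing : List String × String × Int := (["  k1 = v1", "key22 = v", "plain"], "=", -1)

def Spec_get_spacing (lines : List String) (sep : String) (maxsplit : Int) (out : Int × List Int) : Prop := out = get_spacing_alt lines sep maxsplit
instance (lines : List String) (sep : String) (maxsplit : Int) (out : Int × List Int) : Decidable (Spec_get_spacing lines sep maxsplit out) := by unfold Spec_get_spacing; infer_instance

-- ===== CLAIM (what is proved, stated in full; the proofs are below) =====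
def Claim_equal_get_spacing : Prop := ∀ (lines : List String) (sep : String) (maxsplit : Int), Dom_get_spacing lines sep maxsplit → Pre_get_spacing lines sep maxsplit → Spec_get_spacing lines sep maxsplit (get_spacing lines sep maxsplit)

-- ===== LEMMAS AND PROOFS =====

-- proof-only abbreviation: one elementwise zip/max step of A's colw update
def pvStep (N : Int) (c w : List Int) : List Int :=
  List.map (fun p => max p.1 p.2) (c.zip (w ++ List.replicate ((N - (w.length : Int)).toNat) (0 : Int)))

lemma pvStep_length (N : Int) (c w : List Int) (hc : c.length ≤ N.toNat) :
    (pvStep N c w).length = c.length := by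
  simp [pvStep]; omega

lemma pvPad_getD (N : Int) (w : List Int) (j : Nat) (hjN : j < N.toNat) :
    (w ++ List.replicate ((N - (w.length : Int)).toNat) (0 : Int)).getD j 0 = w.getD j 0 := by
  have hlen : (w ++ List.replicate ((N - (w.length : Int)).toNat) (0 : Int)).length
      = w.length + ((N - (w.length : Int)).toNat) := by simp
  by_cases h : j < w.length
  · rw [List.getD_eq_getElem _ _ (by omega), List.getElem_append_left h,
      List.getD_eq_getElem _ _ h]
  · rw [List.getD_eq_default w _ (by omega), List.getD_eq_getElem _ _ (by omega),
      List.getElem_append_right (by omega)]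
    simp

lemma pvStep_getD (N : Int) (c w : List Int) (hc : c.length ≤ N.toNat) (j : Nat) (hj : j < c.length) :
    (pvStep N c w).getD j 0 = max (c.getD j 0) (w.getD j 0) := by
  have hz : j < (c.zip (w ++ List.replicate ((N - (w.length : Int)).toNat) (0 : Int))).length := by
    simp; omega
  rw [pvStep, List.getD_eq_getElem _ _ (by simpa using hz)]
  simp only [List.getElem_map, List.getElem_zip]
  rw [List.getD_eq_getElem c _ hj, ← pvPad_getD N w j (by omega),
    List.getD_eq_getElem _ _ (by simp at hz ⊢; omega)]

lemma pvColwFold (N : Int) (ws : List (List Int)) :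
    ∀ c : List Int, c.length ≤ N.toNat →
      (ws.foldl (pvStep N) c).length = c.length ∧
      ∀ j, j < c.length →
        (ws.foldl (pvStep N) c).getD j 0 = ws.foldl (fun a w => max a (w.getD j 0)) (c.getD j 0) := by
  induction ws with
  | nil => exact fun c _ => ⟨rfl, fun j _ => rfl⟩
  | cons w t ih =>
    intro c hc
    have h1 := pvStep_length N c w hc
    obtain ⟨ihl, ihg⟩ := ih (pvStep N c w) (by rw [h1]; exact hc)
    refine ⟨by simp only [List.foldl_cons]; rw [ihl, h1], ?_⟩
    intro j hj
    simp only [List.foldl_cons]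
    rw [ihg j (by omega), pvStep_getD N c w hc j hj]

lemma pvRangeEq (N : Int) :
    PySem.List.pyRange 0 N 1 = (List.range N.toNat).map (fun k : Nat => (k : Int)) := by
  by_cases h : 0 ≤ N
  · obtain ⟨n, rfl⟩ : ∃ n : Nat, N = (n : Int) := ⟨N.toNat, (Int.toNat_of_nonneg h).symm⟩
    rw [PySem.List.pyRange_zero_natCast, Int.toNat_natCast]
  · rw [PySem.List.pyRange_of_pos 0 N (by norm_num)]
    have h1 : ¬ ((0 : Int) < N) := by omega
    have h2 : N.toNat = 0 := by omega
    simp [h1, h2]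

lemma pvFoldlMaxZero (xs : List Int) (h : ∀ x ∈ xs, 0 ≤ x) :
    xs.foldl max 0 = PySem.List.maxD xs (fun x => x) 0 := by
  cases xs with
  | nil => simp [PySem.List.maxD_nil]
  | cons x t =>
    rw [PySem.List.maxD_id_cons]
    simp only [List.foldl_cons]
    congr 1
    exact max_eq_right (h x (by simp))

lemma pvFoldlMaxFilter {σ : Type} (l : List σ) (u : σ → Int) (p : σ → Bool)
    (hu : ∀ x ∈ l, 0 ≤ u x) (hp : ∀ x ∈ l, p x = false → u x = 0) :
    ∀ a : Int, 0 ≤ a → (l.map u).foldl max a = ((l.filter p).map u).foldl max a := by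
  induction l with
  | nil => intro a _; rfl
  | cons x t ih =>
    intro a ha
    by_cases hx : p x = true
    · simp only [List.map_cons, List.foldl_cons, List.filter_cons, hx, if_true]
      exact ih (fun y hy => hu y (List.mem_cons_of_mem _ hy))
        (fun y hy => hp y (List.mem_cons_of_mem _ hy)) _
        (le_trans ha (le_max_left _ _))
    · have hx' : p x = false := by simpa using hx
      have h0 : u x = 0 := hp x (by simp) hx'
      simp only [List.map_cons, List.foldl_cons, List.filter_cons, hx', Bool.false_eq_true,
        if_false, h0]
      rw [max_eq_left ha]
      exact ih (fun y hy => hu y (List.mem_cons_of_mem _ hy))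
        (fun y hy => hp y (List.mem_cons_of_mem _ hy)) _ ha

lemma pvLead_nonneg (l : String) : 0 ≤ PySem.Str.len l - ((pvLstripSpaces l).length : Int) := by
  rw [PySem.Str.len_eq]
  have := List.length_dropWhile_le (fun c => c == ' ') l.toList
  simp only [pvLstripSpaces]
  omega

lemma pvGetD_nonneg (xs : List Int) (h : ∀ x ∈ xs, 0 ≤ x) (i : Nat) : 0 ≤ xs.getD i 0 := by
  by_cases hi : i < xs.length
  · rw [List.getD_eq_getElem _ _ hi]; exact h _ (List.getElem_mem hi)
  · rw [List.getD_eq_default _ _ (by omega)]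

lemma pvMain (lines : List String) (sep : String) (m N : Int) (f : String → Int)
    (hf : ∀ s, 0 ≤ f s) :
    (List.foldl
      (fun st l =>
        if (List.map f ((PySem.Str.splitMax? l sep m).getD [])).length = 1 then st
        else
          (max st.1 (PySem.Str.len l - ((pvLstripSpaces l).length : Int)),
            List.map (fun p => max p.1 p.2)
              (st.2.zip
                (List.map f ((PySem.Str.splitMax? l sep m).getD []) ++
                  PySem.List.pyRepeat [0]
                    (N - ((List.map f ((PySem.Str.splitMax? l sep m).getD [])).length : Int))))))
      ((0 : Int), PySem.List.pyRepeat [0] N) lines)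
    =
    (PySem.List.maxD
        (List.map (fun r => PySem.Str.len r.1 - ((pvLstripSpaces r.1).length : Int))
          (List.foldl
            (fun acc l =>
              if ((PySem.Str.splitMax? l sep m).getD []).length ≠ 1 then
                acc ++ [(l, List.map f ((PySem.Str.splitMax? l sep m).getD []))]
              else acc)
            [] lines))
        (fun x => x) 0,
      List.map
        (fun j =>
          PySem.List.maxD
            (List.map (fun r => PySem.List.pyGetD r.2 j 0)
              (List.filter (fun r => decide (j < (r.2.length : Int)))
                (List.foldl
                  (fun acc l =>
                    if ((PySem.Str.splitMax? l sep m).getD []).length ≠ 1 then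
                      acc ++ [(l, List.map f ((PySem.Str.splitMax? l sep m).getD []))]
                    else acc)
                  [] lines)))
            (fun x => x) 0)
        (PySem.List.pyRange 0 N 1)) := by
  simp only [PySem.List.pyRepeat_singleton]
  rw [PySem.List.foldl_congr_mem lines
      (fun st l => if (List.map f ((PySem.Str.splitMax? l sep m).getD [])).length = 1 then st
        else (max st.1 (PySem.Str.len l - ((pvLstripSpaces l).length : Int)),
          List.map (fun p => max p.1 p.2)
            (st.2.zip (List.map f ((PySem.Str.splitMax? l sep m).getD []) ++
              List.replicate ((N - ((List.map f ((PySem.Str.splitMax? l sep m).getD [])).length : Int)).toNat) 0))))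
      (fun st l => if ((PySem.Str.splitMax? l sep m).getD []).length ≠ 1 then
          (max st.1 (PySem.Str.len l - ((pvLstripSpaces l).length : Int)),
           pvStep N st.2 (List.map f ((PySem.Str.splitMax? l sep m).getD []))) else st)
      ((0 : Int), List.replicate N.toNat (0 : Int))
      (by
        intro st l _
        by_cases h : ((PySem.Str.splitMax? l sep m).getD []).length = 1
        · simp [h]
        · simp [pvStep, h])]
  rw [PySem.List.foldl_ite_eq_foldl_filter
      (p := fun l => ((PySem.Str.splitMax? l sep m).getD []).length ≠ 1)
      (f := fun st l => (max st.1 (PySem.Str.len l - ((pvLstripSpaces l).length : Int)),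
        pvStep N st.2 (List.map f ((PySem.Str.splitMax? l sep m).getD []))))]
  rw [PySem.List.foldl_append_ite
      (p := fun l => ((PySem.Str.splitMax? l sep m).getD []).length ≠ 1)
      (f := fun l => (l, List.map f ((PySem.Str.splitMax? l sep m).getD []))) lines []]
  simp only [List.nil_append]
  set kept := lines.filter (fun l => decide (((PySem.Str.splitMax? l sep m).getD []).length ≠ 1)) with hkept
  rw [PySem.List.foldl_prod_mk
      (f := fun a l => max a (PySem.Str.len l - ((pvLstripSpaces l).length : Int)))
      (g := fun c l => pvStep N c (List.map f ((PySem.Str.splitMax? l sep m).getD [])))]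
  rw [Prod.mk.injEq]
  constructor
  · rw [List.map_map]
    rw [show ((fun r : String × List Int => PySem.Str.len r.1 - ((pvLstripSpaces r.1).length : Int)) ∘
          (fun l => (l, List.map f ((PySem.Str.splitMax? l sep m).getD [])))) =
          (fun l => PySem.Str.len l - ((pvLstripSpaces l).length : Int)) from rfl]
    rw [← pvFoldlMaxZero _ (by
      intro x hx
      obtain ⟨l, _, rfl⟩ := List.mem_map.1 hx
      exact pvLead_nonneg l)]
    exact (List.foldl_map).symm
  · rw [pvRangeEq, List.map_map]
    rw [← List.foldl_map (f := fun l => List.map f ((PySem.Str.splitMax? l sep m).getD []))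
      (g := pvStep N)]
    obtain ⟨hlen, hget⟩ := pvColwFold N
      (kept.map (fun l => List.map f ((PySem.Str.splitMax? l sep m).getD [])))
      (List.replicate N.toNat 0) (by simp)
    apply List.ext_getElem
    · rw [hlen]; simp
    · intro i h1 h2
      rw [← List.getD_eq_getElem _ 0 h1, hget i (by simp at hlen ⊢; omega)]
      simp only [List.getElem_map, List.getElem_range, Function.comp_apply]
      rw [List.getD_eq_getElem _ _ (by simp at hlen ⊢; omega), List.getElem_replicate]
      rw [List.foldl_map]
      rw [← List.foldl_map
        (f := fun l => (List.map f ((PySem.Str.splitMax? l sep m).getD [])).getD i 0) (g := max)]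
      simp only [List.filter_map, List.map_map, Function.comp_def]
      simp only [PySem.List.pyGetD_natCast]
      rw [pvFoldlMaxFilter kept
          (fun l => (List.map f ((PySem.Str.splitMax? l sep m).getD [])).getD i 0)
          (fun l => decide ((i : Int) < ((List.map f ((PySem.Str.splitMax? l sep m).getD [])).length : Int)))
          (fun l _ => pvGetD_nonneg _ (by
            intro x hx
            obtain ⟨s, _, rfl⟩ := List.mem_map.1 hx
            exact hf s) i)
          (fun l _ hfalse => by
            have hnl : ¬ ((i : Int) < ((List.map f ((PySem.Str.splitMax? l sep m).getD [])).length : Int)) := by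
              simpa using hfalse
            exact List.getD_eq_default _ _ (by exact_mod_cast not_lt.1 hnl))
          0 le_rfl]
      rw [pvFoldlMaxZero _ (by
        intro x hx
        obtain ⟨l, hl, rfl⟩ := List.mem_map.1 hx
        exact pvGetD_nonneg _ (by
          intro y hy
          obtain ⟨s, _, rfl⟩ := List.mem_map.1 hy
          exact hf s) i)]


-- ===== VERDICT (by name: the statement is the Claim_ definition above) =====
theorem get_spacing_spec : Claim_equal_get_spacing := by
  intro lines sep maxsplit _ _
  unfold Spec_get_spacing
  show get_spacing lines sep maxsplit = get_spacing_alt lines sep maxsplit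
  simp only [get_spacing, get_spacing_alt]
  rw [pvMain lines sep _ _ _ (fun s => by rw [PySem.Str.len_eq]; exact Int.natCast_nonneg _)]
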